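-- pv_equiv track=rewrite | github.com/PedroNJorge/Introduction-to-Programming-Python | Problem Sets/Class_008/ex075.py | word_types
-- ===== SOURCE A (Python) =====
-- def word_types(lst):
--     dic = {"lower": 0, "upper": 0, "other": 0}
--
--     for i in lst:
--         if i == i.lower():
--             dic["lower"] += 1
--         elif i == i.upper():
--             dic["upper"] += 1
--         else:
--             dic["other"] += 1
--     return (dic["lower"], dic["upper"], dic["other"])
-- ===== SOURCE B (Python) =====
-- def word_types(lst):
--     lower = sum(1 for w in lst if w == w.lower())
--     upper = sum(1 for w in lst if w != w.lower() and w == w.upper())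
--     return (lower, upper, len(lst) - lower - upper)
-- ===== Notes on version B (the rewrite author's own statement) =====
-- stated objective: simpler
-- what changed: Replaces the mutable three-key dict accumulated in one branching loop by three independent counts (two filtering passes plus arithmetic: other = len - lower - upper).
import Mathlib
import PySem

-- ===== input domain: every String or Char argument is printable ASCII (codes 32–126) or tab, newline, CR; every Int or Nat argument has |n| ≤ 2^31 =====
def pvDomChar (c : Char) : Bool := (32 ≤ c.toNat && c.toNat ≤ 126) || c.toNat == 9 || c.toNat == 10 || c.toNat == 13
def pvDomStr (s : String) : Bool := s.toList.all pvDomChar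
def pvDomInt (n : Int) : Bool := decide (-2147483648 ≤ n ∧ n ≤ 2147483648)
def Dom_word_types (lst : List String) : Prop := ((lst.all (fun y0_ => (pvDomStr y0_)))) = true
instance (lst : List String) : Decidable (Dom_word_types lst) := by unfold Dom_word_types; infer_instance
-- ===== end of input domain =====

-- B replaces A's mutable three-key dict and branching loop by three independent counts
-- (two filters plus 'other = len - lower - upper'); objective: simpler.

-- ===== PORT A =====
-- the loop body of A (if/elif/else incrementing one of the three dict entries)
def wtStep (dic : PySem.Dict String Int) (i : String) : PySem.Dict String Int :=
  if i = PySem.Str.lower i then dic.modify "lower" 0 (· + 1)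
  else if i = PySem.Str.upper i then dic.modify "upper" 0 (· + 1)
  else dic.modify "other" 0 (· + 1)

def word_types (lst : List String) : Int × Int × Int :=
  let dic : PySem.Dict String Int := PySem.Dict.ofList [("lower", 0), ("upper", 0), ("other", 0)]
  let dic := lst.foldl wtStep dic
  -- dic["lower"] etc.: the three keys are always present, so the KeyError branch is unreachable
  (dic.getD "lower" 0, dic.getD "upper" 0, dic.getD "other" 0)

-- ===== PORT B =====
def word_types_alt (lst : List String) : Int × Int × Int :=
  let lower : Int := (lst.filter (fun w => w == PySem.Str.lower w)).length
  let upper : Int := (lst.filter (fun w => w != PySem.Str.lower w && w == PySem.Str.upper w)).length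
  (lower, upper, (lst.length : Int) - lower - upper)

-- ===== PRECONDITION & SPEC =====
def Spec_word_types (lst : List String) (out : Int × Int × Int) : Prop := out = word_types_alt lst
instance (lst : List String) (out : Int × Int × Int) : Decidable (Spec_word_types lst out) := by unfold Spec_word_types; infer_instance

-- ===== CLAIM (what is proved, stated in full; the proofs are below) =====
def Claim_equal_word_types : Prop := ∀ (lst : List String), Dom_word_types lst → Spec_word_types lst (word_types lst)

-- ===== LEMMAS AND PROOFS =====

-- the three lookups after A's fold, from an arbitrary starting dict
theorem wt_foldl_getD (lst : List String) (d : PySem.Dict String Int) :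
    ((lst.foldl wtStep d).getD "lower" 0,
     (lst.foldl wtStep d).getD "upper" 0,
     (lst.foldl wtStep d).getD "other" 0)
    = (d.getD "lower" 0 + (lst.countP (fun w => w == PySem.Str.lower w) : Int),
       d.getD "upper" 0 + (lst.countP (fun w => w != PySem.Str.lower w && w == PySem.Str.upper w) : Int),
       d.getD "other" 0 + (lst.countP (fun w => w != PySem.Str.lower w && w != PySem.Str.upper w) : Int)) := by
  induction lst generalizing d with
  | nil => simp
  | cons x xs ih =>
    simp only [List.foldl_cons, List.countP_cons]
    rw [ih]
    unfold wtStep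
    by_cases h1 : x = PySem.Str.lower x
    · have e1 : (x == PySem.Str.lower x) = true := beq_iff_eq.mpr h1
      have e1' : (x != PySem.Str.lower x) = false := by simp [bne, e1]
      rw [if_pos h1]
      simp only [Prod.mk.injEq, e1, e1', Bool.false_and, if_true,
        PySem.Dict.getD_modify_self,
        PySem.Dict.getD_modify_of_ne _ _ _ (show ("upper" : String) ≠ "lower" by decide),
        PySem.Dict.getD_modify_of_ne _ _ _ (show ("other" : String) ≠ "lower" by decide)]
      push_cast
      refine ⟨by ring, by ring, by ring⟩
    · have e1 : (x == PySem.Str.lower x) = false := by simp [h1]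
      have e1' : (x != PySem.Str.lower x) = true := by simp [bne, e1]
      rw [if_neg h1]
      by_cases h2 : x = PySem.Str.upper x
      · have e2 : (x == PySem.Str.upper x) = true := beq_iff_eq.mpr h2
        have e2' : (x != PySem.Str.upper x) = false := by simp [bne, e2]
        rw [if_pos h2]
        simp only [Prod.mk.injEq, e1, e1', e2, e2', Bool.true_and, Bool.and_false,
          if_true,
          PySem.Dict.getD_modify_self,
          PySem.Dict.getD_modify_of_ne _ _ _ (show ("lower" : String) ≠ "upper" by decide),
          PySem.Dict.getD_modify_of_ne _ _ _ (show ("other" : String) ≠ "upper" by decide)]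
        push_cast
        refine ⟨by ring, by ring, by ring⟩
      · have e2 : (x == PySem.Str.upper x) = false := by simp [h2]
        have e2' : (x != PySem.Str.upper x) = true := by simp [bne, e2]
        rw [if_neg h2]
        simp only [Prod.mk.injEq, e1, e1', e2, e2', Bool.true_and, Bool.and_false,
          if_true,
          PySem.Dict.getD_modify_self,
          PySem.Dict.getD_modify_of_ne _ _ _ (show ("lower" : String) ≠ "other" by decide),
          PySem.Dict.getD_modify_of_ne _ _ _ (show ("upper" : String) ≠ "other" by decide)]
        push_cast
        refine ⟨by ring, by ring, by ring⟩

-- the three disjoint counts partition the list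
theorem wt_count_partition (lst : List String) :
    lst.countP (fun w => w == PySem.Str.lower w)
    + lst.countP (fun w => w != PySem.Str.lower w && w == PySem.Str.upper w)
    + lst.countP (fun w => w != PySem.Str.lower w && w != PySem.Str.upper w)
    = lst.length := by
  induction lst with
  | nil => rfl
  | cons x xs ih =>
    simp only [List.countP_cons, List.length_cons]
    rcases Bool.eq_false_or_eq_true (x == PySem.Str.lower x) with e1 | e1 <;>
    rcases Bool.eq_false_or_eq_true (x == PySem.Str.upper x) with e2 | e2 <;>
      simp [e1, e2, bne] at ih ⊢ <;> omega

-- ===== VERDICT (by name: the statement is the Claim_ definition above) =====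
theorem word_types_spec : Claim_equal_word_types := by
  intro lst _
  unfold Spec_word_types word_types word_types_alt
  have h := wt_foldl_getD lst (PySem.Dict.ofList [("lower", 0), ("upper", 0), ("other", 0)])
  have hp := wt_count_partition lst
  simp only [Prod.mk.injEq] at h ⊢
  obtain ⟨hl, hu, ho⟩ := h
  rw [hl, hu, ho]
  have d1 : (PySem.Dict.ofList [(("lower" : String), (0 : Int)), ("upper", 0), ("other", 0)]).getD "lower" 0 = 0 := by decide
  have d2 : (PySem.Dict.ofList [(("lower" : String), (0 : Int)), ("upper", 0), ("other", 0)]).getD "upper" 0 = 0 := by decide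
  have d3 : (PySem.Dict.ofList [(("lower" : String), (0 : Int)), ("upper", 0), ("other", 0)]).getD "other" 0 = 0 := by decide
  rw [d1, d2, d3]
  simp only [List.countP_eq_length_filter] at hp ⊢
  refine ⟨by ring, by ring, ?_⟩
  omega
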